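-- pv_equiv track=rewrite | github.com/lawang24/competitive-programming-archive | Codeforces/969/969c.py | solve
-- ===== SOURCE A (Python) =====
-- def find_closest(options, number, target):
--     local_champ = 0
--     for i in options:
--         if i!=0:
--             diff1 = (target-number) % i
--             local_champ = max(diff1,local_champ)
--     return local_champ
--
-- def solve(a,b,nums):
--     options = [a,b,b-a]
--     _max = max(nums)
--     champ = 0
--     for f in range(_max,_max+b):
--         for num in nums:
--             champ = max(champ, find_closest(options, num, f))
--     return champ
-- ===== SOURCE B (Python) =====
-- def solve(a, b, nums):
--     # O(len(nums)) closed form: for option i>0, the window of b consecutive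
--     # shifts f-num has max residue min(((max(nums)-num) % i) + b - 1, i - 1).
--     m = max(nums)
--     if b <= 0:
--         return 0
--     best = 0
--     for i in (a, b, b - a):
--         if i > 0:
--             for num in nums:
--                 s = (m - num) % i
--                 best = max(best, min(s + b - 1, i - 1))
--     return best
-- ===== Notes on version B (the rewrite author's own statement) =====
-- stated objective: faster
-- what changed: Replaces the O(b*n) scan over all f in range(max,max+b) by a per-(option,num) closed form min(((max-num)%i)+b-1, i-1) for the maximal residue of b consecutive values, so the b-length loop disappears.
import Mathlib
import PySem

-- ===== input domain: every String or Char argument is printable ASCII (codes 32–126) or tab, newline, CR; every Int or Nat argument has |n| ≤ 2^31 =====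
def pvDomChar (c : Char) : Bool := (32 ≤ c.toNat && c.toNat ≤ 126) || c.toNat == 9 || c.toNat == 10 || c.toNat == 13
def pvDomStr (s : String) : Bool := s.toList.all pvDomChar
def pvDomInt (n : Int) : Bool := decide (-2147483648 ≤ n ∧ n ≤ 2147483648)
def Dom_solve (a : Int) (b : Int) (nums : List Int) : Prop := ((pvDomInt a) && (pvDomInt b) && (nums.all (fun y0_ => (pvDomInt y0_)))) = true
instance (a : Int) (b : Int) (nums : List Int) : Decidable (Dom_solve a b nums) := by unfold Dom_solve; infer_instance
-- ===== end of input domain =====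

-- B replaces A's O(b*n) scan over f in range(max,max+b) by a per-(option,num)
-- closed form min(((max-num)%i)+b-1, i-1); same return value on nonempty nums.

-- ===== PORT A =====
def find_closest (options : List Int) (number : Int) (target : Int) : Int :=
  options.foldl (fun local_champ i =>
    if i ≠ 0 then max (PySem.Int.mod (target - number) i) local_champ else local_champ) 0

def solve (a : Int) (b : Int) (nums : List Int) : Int :=
  let options := [a, b, b - a]
  match PySem.List.max? nums (fun x => x) with
  | none => 0   -- Python raises here (max of empty); excluded by Pre_solve
  | some _max =>
    (PySem.List.pyRange _max (_max + b) 1).foldl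
      (fun champ f =>
        nums.foldl (fun champ num => max champ (find_closest options num f)) champ) 0

-- ===== PORT B =====
def solve_alt (a : Int) (b : Int) (nums : List Int) : Int :=
  match PySem.List.max? nums (fun x => x) with
  | none => 0   -- Python raises here (max of empty); excluded by Pre_solve
  | some m =>
    if b ≤ 0 then 0
    else
      [a, b, b - a].foldl (fun best i =>
        if 0 < i then
          nums.foldl (fun best num =>
            max best (min (PySem.Int.mod (m - num) i + b - 1) (i - 1))) best
        else best) 0

-- ===== PRECONDITION & SPEC =====
-- Pre_ excludes only the empty list, on which Python's max(nums) raises ValueError.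
def Pre_solve (a : Int) (b : Int) (nums : List Int) : Prop := nums ≠ []
instance (a : Int) (b : Int) (nums : List Int) : Decidable (Pre_solve a b nums) := by unfold Pre_solve; infer_instance
def pvWitness_solve : Int × Int × List Int := (1, 2, [3])

def Spec_solve (a : Int) (b : Int) (nums : List Int) (out : Int) : Prop := out = solve_alt a b nums
instance (a : Int) (b : Int) (nums : List Int) (out : Int) : Decidable (Spec_solve a b nums out) := by unfold Spec_solve; infer_instance

-- ===== CLAIM (what is proved, stated in full; the proofs are below) =====
def Claim_equal_solve : Prop := ∀ (a : Int) (b : Int) (nums : List Int), Dom_solve a b nums → Pre_solve a b nums → Spec_solve a b nums (solve a b nums)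

-- ===== LEMMAS AND PROOFS =====

-- generic: a running max of a projection is ≤ t iff the seed and every projected value are ≤ t
theorem foldl_max_le_iff {α : Type} (g : α → Int) (l : List α) (c t : Int) :
    l.foldl (fun acc x => max acc (g x)) c ≤ t ↔ c ≤ t ∧ ∀ x ∈ l, g x ≤ t := by
  induction l generalizing c with
  | nil => simp
  | cons x xs ih =>
    simp only [List.foldl_cons, ih, max_le_iff, List.mem_cons]
    constructor
    · rintro ⟨⟨h1, h2⟩, h3⟩; exact ⟨h1, fun y hy => by rcases hy with rfl | hy; exact h2; exact h3 y hy⟩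
    · rintro ⟨h1, h2⟩; exact ⟨⟨h1, h2 x (Or.inl rfl)⟩, fun y hy => h2 y (Or.inr hy)⟩

-- A's find_closest fold, with its skip of i = 0
theorem fc_fold_le_iff (number target : Int) (l : List Int) (c t : Int) :
    l.foldl (fun local_champ i =>
      if i ≠ 0 then max (PySem.Int.mod (target - number) i) local_champ else local_champ) c ≤ t
    ↔ c ≤ t ∧ ∀ i ∈ l, i ≠ 0 → PySem.Int.mod (target - number) i ≤ t := by
  induction l generalizing c with
  | nil => simp
  | cons x xs ih =>
    simp only [List.foldl_cons, ih, List.mem_cons]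
    by_cases hx : x = 0
    · subst hx; simp
    · simp only [hx, ne_eq, not_false_iff, if_true, max_le_iff]
      constructor
      · rintro ⟨⟨h1, h2⟩, h3⟩
        exact ⟨h2, fun i hi hne => by rcases hi with rfl | hi; exact h1; exact h3 i hi hne⟩
      · rintro ⟨h1, h2⟩
        exact ⟨⟨h2 x (Or.inl rfl) hx, h1⟩, fun i hi hne => h2 i (Or.inr hi) hne⟩

-- A's outer double loop
theorem afold_le_iff (options : List Int) (nums R : List Int) (c t : Int) :
    R.foldl (fun champ f =>
      nums.foldl (fun champ num => max champ (find_closest options num f)) champ) c ≤ t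
    ↔ c ≤ t ∧ ∀ f ∈ R, ∀ num ∈ nums, find_closest options num f ≤ t := by
  induction R generalizing c with
  | nil => simp
  | cons f fs ih =>
    simp only [List.foldl_cons, ih, foldl_max_le_iff, List.mem_cons]
    constructor
    · rintro ⟨⟨h1, h2⟩, h3⟩
      exact ⟨h1, fun x hx => by rcases hx with rfl | hx; exact h2; exact h3 x hx⟩
    · rintro ⟨h1, h2⟩
      exact ⟨⟨h1, h2 f (Or.inl rfl)⟩, fun x hx => h2 x (Or.inr hx)⟩

-- B's option loop
theorem bfold_le_iff (m b : Int) (nums l : List Int) (c t : Int) :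
    l.foldl (fun best i =>
      if 0 < i then
        nums.foldl (fun best num =>
          max best (min (PySem.Int.mod (m - num) i + b - 1) (i - 1))) best
      else best) c ≤ t
    ↔ c ≤ t ∧ ∀ i ∈ l, 0 < i → ∀ num ∈ nums,
        min (PySem.Int.mod (m - num) i + b - 1) (i - 1) ≤ t := by
  induction l generalizing c with
  | nil => simp
  | cons i is ih =>
    simp only [List.foldl_cons, List.mem_cons]
    by_cases hi : 0 < i
    · simp only [if_pos hi, ih, foldl_max_le_iff]
      constructor
      · rintro ⟨⟨h1, h2⟩, h3⟩
        exact ⟨h1, fun j hj hjp num hnum => by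
          rcases hj with rfl | hj
          · exact h2 num hnum
          · exact h3 j hj hjp num hnum⟩
      · rintro ⟨h1, h2⟩
        exact ⟨⟨h1, fun num hnum => h2 i (Or.inl rfl) hi num hnum⟩,
               fun j hj hjp num hnum => h2 j (Or.inr hj) hjp num hnum⟩
    · simp only [if_neg hi, ih]
      constructor
      · rintro ⟨h1, h2⟩
        exact ⟨h1, fun j hj hjp num hnum => by
          rcases hj with rfl | hj
          · exact absurd hjp hi
          · exact h2 j hj hjp num hnum⟩
      · rintro ⟨h1, h2⟩
        exact ⟨h1, fun j hj hjp num hnum => h2 j (Or.inr hj) hjp num hnum⟩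

-- shifting inside emod: (x + j) % i = (x % i + j) % i for i ≠ 0
theorem emod_add_shift (x j i : Int) : (x + j) % i = (x % i + j) % i := by
  conv_lhs => rw [← Int.mul_ediv_add_emod x i]
  rw [show i * (x / i) + x % i + j = x % i + j + i * (x / i) by ring]
  exact Int.add_mul_emod_self_left (x % i + j) i (x / i)

-- upper bound: residues of a window starting at x move up by at most j
theorem emod_add_le (x j i : Int) (hi : 0 < i) (hj : 0 ≤ j) :
    (x + j) % i ≤ x % i + j := by
  rw [emod_add_shift]
  have hnn : 0 ≤ x % i := Int.emod_nonneg x (by omega)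
  by_cases h : x % i + j < i
  · rw [Int.emod_eq_of_lt (by omega) h]
  · have := Int.emod_lt_of_pos (x % i + j) hi; omega

-- exact value when no wrap occurs
theorem emod_add_eq (x j i : Int) (hi : 0 < i) (hj : 0 ≤ j) (hlt : x % i + j < i) :
    (x + j) % i = x % i + j := by
  rw [emod_add_shift]
  have hnn : 0 ≤ x % i := Int.emod_nonneg x (by omega)
  exact Int.emod_eq_of_lt (by omega) hlt

-- key pointwise bound: any residue in the window is ≤ B's closed form
theorem aval_le_bval (m b i num f : Int) (hi : 0 < i) (hf : m ≤ f) (hfb : f < m + b) :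
    PySem.Int.mod (f - num) i ≤ min (PySem.Int.mod (m - num) i + b - 1) (i - 1) := by
  rw [PySem.Int.mod_eq_emod_of_pos hi, PySem.Int.mod_eq_emod_of_pos hi]
  have h1 : (f - num) % i ≤ (m - num) % i + (f - m) := by
    have := emod_add_le (m - num) (f - m) i hi (by omega)
    rw [show m - num + (f - m) = f - num by ring] at this
    exact this
  have h2 : (f - num) % i < i := Int.emod_lt_of_pos _ hi
  omega

-- key attainment: B's closed form is the residue at f = m + min (b-1) (i-1-s)
theorem bval_eq_aval (m b i num : Int) (hi : 0 < i) (hb : 0 < b) :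
    PySem.Int.mod (m - num + min (b - 1) (i - 1 - PySem.Int.mod (m - num) i)) i
      = min (PySem.Int.mod (m - num) i + b - 1) (i - 1) := by
  rw [PySem.Int.mod_eq_emod_of_pos hi, PySem.Int.mod_eq_emod_of_pos hi]
  have hs0 : 0 ≤ (m - num) % i := Int.emod_nonneg _ (by omega)
  have hsi : (m - num) % i < i := Int.emod_lt_of_pos _ hi
  set s := (m - num) % i with hs
  rw [emod_add_eq (m - num) (min (b - 1) (i - 1 - s)) i hi (by omega) (by rw [← hs]; omega)]
  omega

-- the core equality for any seed maximum m
theorem core_eq (a b m : Int) (nums : List Int) :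
    (PySem.List.pyRange m (m + b) 1).foldl
      (fun champ f =>
        nums.foldl (fun champ num => max champ (find_closest [a, b, b - a] num f)) champ) 0
    = (if b ≤ 0 then 0
       else [a, b, b - a].foldl (fun best i =>
        if 0 < i then
          nums.foldl (fun best num =>
            max best (min (PySem.Int.mod (m - num) i + b - 1) (i - 1))) best
        else best) 0) := by
  by_cases hb : b ≤ 0
  · rw [if_pos hb, PySem.List.pyRange_one_eq_nil (by omega)]
    simp
  · rw [if_neg hb]
    rw [not_le] at hb
    set L := (PySem.List.pyRange m (m + b) 1).foldl
      (fun champ f =>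
        nums.foldl (fun champ num => max champ (find_closest [a, b, b - a] num f)) champ) 0 with hL
    set Rv := [a, b, b - a].foldl (fun best i =>
        if 0 < i then
          nums.foldl (fun best num =>
            max best (min (PySem.Int.mod (m - num) i + b - 1) (i - 1))) best
        else best) 0 with hR
    -- self-applications: lower-bound facts
    have hLble := (afold_le_iff [a, b, b - a] nums (PySem.List.pyRange m (m + b) 1) 0 L).mp (le_of_eq hL.symm)
    have hRble := (bfold_le_iff m b nums [a, b, b - a] 0 Rv).mp (le_of_eq hR.symm)
    apply le_antisymm
    · rw [hL, afold_le_iff]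
      refine ⟨hRble.1, fun f hf num hnum => ?_⟩
      rw [PySem.List.mem_pyRange_one] at hf
      unfold find_closest
      rw [fc_fold_le_iff]
      refine ⟨hRble.1, fun i hi hne => ?_⟩
      by_cases hip : 0 < i
      · calc PySem.Int.mod (f - num) i
            ≤ min (PySem.Int.mod (m - num) i + b - 1) (i - 1) :=
              aval_le_bval m b i num f hip hf.1 hf.2
          _ ≤ Rv := hRble.2 i hi hip num hnum
      · have hneg : i < 0 := by omega
        have := (PySem.Int.mod_neg_bounds (f - num) hneg).2
        omega
    · rw [hR, bfold_le_iff]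
      refine ⟨hLble.1, fun i hi hip num hnum => ?_⟩
      set s := PySem.Int.mod (m - num) i with hs
      have hs0 : 0 ≤ s := PySem.Int.mod_nonneg _ hip
      have hsi : s < i := PySem.Int.mod_lt _ hip
      set j := min (b - 1) (i - 1 - s) with hj
      have hfmem : m + j ∈ PySem.List.pyRange m (m + b) 1 := by
        rw [PySem.List.mem_pyRange_one]; omega
      have hfc := (fc_fold_le_iff num (m + j) [a, b, b - a] 0
          (find_closest [a, b, b - a] num (m + j))).mp (le_of_eq rfl)
      calc min (s + b - 1) (i - 1)
          = PySem.Int.mod (m + j - num) i := by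
            rw [show m + j - num = m - num + j by ring, hj, hs]
            exact (bval_eq_aval m b i num hip hb).symm
        _ ≤ find_closest [a, b, b - a] num (m + j) := hfc.2 i hi (by omega)
        _ ≤ L := hLble.2 (m + j) hfmem num hnum

-- ===== VERDICT (by name: the statement is the Claim_ definition above) =====
theorem solve_spec : Claim_equal_solve := by
  intro a b nums _hdom hpre
  unfold Spec_solve solve solve_alt
  cases hmax : PySem.List.max? nums (fun x => x) with
  | none => exact absurd ((PySem.List.max?_eq_none_iff nums (fun x => x)).mp hmax) hpre
  | some m => exact core_eq a b m nums
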